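-- pv_equiv track=rewrite | github.com/Alvirah-Ro/fileReader | table_functions.py | clean_duplicate_headers
-- ===== SOURCE A (Python) =====
-- def clean_duplicate_headers(headers):
--     """
--     Clean duplicate headers by appending numbers to duplicates
--     This function is used in choose_headers function
--     """
--
--     clean_headers = [] # Store final cleaned header names
--     seen_headers = {} # Track how many times each header appears
--
--     for header in headers:
--         # Convert to string and handle None/empty values
--         if header is None or header == '' or str(header).strip() == '':
--             header = "Unnamed"
--         else:
--             header = str(header).strip()
--
--         # Handle duplicates
--         if header in seen_headers:
--             seen_headers[header] += 1
--             unique_header = f"{header}_{seen_headers[header]}" # Add number suffix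
--         else:
--             seen_headers[header] = 0
--             unique_header = header # Keep original name
--
--         clean_headers.append(unique_header)
--
--     return clean_headers
-- ===== SOURCE B (Python) =====
-- def _normalize(h):
--     if h is None:
--         return "Unnamed"
--     t = str(h).strip()
--     return t if t else "Unnamed"
--
--
-- def _label(n, c):
--     return n if c == 0 else f"{n}_{c}"
--
--
-- def clean_duplicate_headers(headers):
--     ns = [_normalize(h) for h in headers]
--     groups = {}
--     for i, n in enumerate(ns):
--         groups.setdefault(n, []).append(i)
--     result = [""] * len(ns)
--     for name, idxs in groups.items():
--         for k, i in enumerate(idxs):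
--             result[i] = _label(name, k)
--     return result
-- ===== Notes on version B (the rewrite author's own statement) =====
-- stated objective: alternative
-- what changed: Replaces A's single pass with a running seen-counts dict by two phases: group all positions by normalized name into an index dict, then scatter each group's labels (name, name_1, ...) back into a preallocated result list by original position.
import Mathlib
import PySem

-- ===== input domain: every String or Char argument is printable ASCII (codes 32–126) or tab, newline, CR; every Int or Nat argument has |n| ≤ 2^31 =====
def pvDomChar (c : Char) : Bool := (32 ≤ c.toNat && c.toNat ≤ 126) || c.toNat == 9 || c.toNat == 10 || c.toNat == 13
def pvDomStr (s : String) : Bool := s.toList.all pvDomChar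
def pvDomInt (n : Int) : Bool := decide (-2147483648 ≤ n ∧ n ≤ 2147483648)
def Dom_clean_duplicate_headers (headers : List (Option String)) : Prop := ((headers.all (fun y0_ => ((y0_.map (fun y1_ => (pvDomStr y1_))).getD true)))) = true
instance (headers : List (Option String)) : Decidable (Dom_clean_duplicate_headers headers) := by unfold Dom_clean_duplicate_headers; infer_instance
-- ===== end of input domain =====

-- B replaces A's one-pass running seen-counts dict by: group indices by normalized name, then scatter labels back by position.


-- ===== PORT A =====
-- A's inline normalization of one header
def pvNormA (header : Option String) : String :=
  match header with
  | none => "Unnamed"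
  | some s => if s = "" ∨ PySem.Str.strip s = "" then "Unnamed" else PySem.Str.strip s

-- one loop step of A: normalize the header, then branch on membership in the seen dict
def pvStepA (st : List String × PySem.Dict String Int) (header : Option String) :
    List String × PySem.Dict String Int :=
  let h : String := pvNormA header
  match st.2.get? h with
  | some c => (st.1 ++ [h ++ "_" ++ PySem.Int.toStr (c + 1)], st.2.insert h (c + 1))
  | none => (st.1 ++ [h], st.2.insert h 0)

def clean_duplicate_headers (headers : List (Option String)) : List String :=
  (headers.foldl pvStepA ([], PySem.Dict.empty)).1

-- ===== PORT B =====
def pvNorm (header : Option String) : String :=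
  match header with
  | none => "Unnamed"
  | some s => let t := PySem.Str.strip s; if t = "" then "Unnamed" else t

def pvLabel (n : String) (c : Int) : String :=
  if c = 0 then n else n ++ "_" ++ PySem.Int.toStr c

-- the indices i of result[i] = … are nonnegative enumerate indices, so .toNat is exact
def clean_duplicate_headers_alt (headers : List (Option String)) : List String :=
  let ns := headers.map pvNorm
  let groups := (PySem.List.enumerate ns).foldl
      (fun d p => d.modify p.2 [] (· ++ [p.1])) (PySem.Dict.empty : PySem.Dict String (List Int))
  groups.items.foldl
    (fun res q => (PySem.List.enumerate q.2).foldl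
        (fun res r => res.set r.2.toNat (pvLabel q.1 r.1)) res)
    (List.replicate ns.length "")

-- ===== PRECONDITION & SPEC =====
def Spec_clean_duplicate_headers (headers : List (Option String)) (out : List String) : Prop := out = clean_duplicate_headers_alt headers
instance (headers : List (Option String)) (out : List String) : Decidable (Spec_clean_duplicate_headers headers out) := by unfold Spec_clean_duplicate_headers; infer_instance

-- ===== CLAIM (what is proved, stated in full; the proofs are below) =====
def Claim_equal_clean_duplicate_headers : Prop := ∀ (headers : List (Option String)), Dom_clean_duplicate_headers headers → Spec_clean_duplicate_headers headers (clean_duplicate_headers headers)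

-- ===== LEMMAS AND PROOFS =====

-- the canonical output: position j carries its name labelled with the count of that name before j
def pvOut (ns : List String) : List String :=
  (PySem.List.enumerate ns).map
    (fun p => pvLabel p.2 ((PySem.List.slice ns none (some p.1)).count p.2))

theorem pvOut_append (ns : List String) (h : String) :
    pvOut (ns ++ [h]) = pvOut ns ++ [pvLabel h ((ns.count h : Int))] := by
  unfold pvOut
  rw [PySem.List.enumerate_append, List.map_append]
  congr 1
  · apply List.map_congr_left
    intro p hp
    rcases (PySem.List.mem_enumerate_iff _ _ _).1 hp with ⟨k, hk, rfl⟩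
    simp only [zero_add]
    rw [PySem.List.slice_to_natCast, PySem.List.slice_to_natCast,
      List.take_append_of_le_length (le_of_lt hk)]
  · simp only [PySem.List.enumerate, zero_add, List.map_cons, List.map_nil]
    rw [PySem.List.slice_to_natCast, List.take_left]

theorem pvOut_length (ns : List String) : (pvOut ns).length = ns.length := by
  simp [pvOut, PySem.List.length_enumerate]

theorem pvOut_getElem? (ns : List String) (j : Nat) (hj : j < ns.length) :
    (pvOut ns)[j]? = some (pvLabel ns[j] (((ns.take j).count ns[j] : Nat) : Int)) := by
  unfold pvOut
  rw [List.getElem?_map, PySem.List.getElem?_enumerate]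
  have : ns[j]? = some ns[j] := List.getElem?_eq_getElem hj
  rw [this]
  simp only [Option.map_some, zero_add]
  rw [PySem.List.slice_to_natCast]

-- ---- A-side: loop invariant ----

theorem pvNormA_eq (header : Option String) : pvNormA header = pvNorm header := by
  cases header with
  | none => rfl
  | some s =>
    by_cases hs : s = ""
    · subst hs; simp [pvNormA, pvNorm]; decide
    · simp only [pvNormA, pvNorm, hs, false_or]

theorem pvFoldA_inv (hs : List (Option String)) :
    ∀ (ns : List String) (st : List String × PySem.Dict String Int),
      st.1 = pvOut ns →
      (∀ name : String,
        st.2.get? name = if ns.count name = 0 then none else some ((ns.count name : Int) - 1)) →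
      (hs.foldl pvStepA st).1 = pvOut (ns ++ hs.map pvNorm) := by
  induction hs with
  | nil => intro ns st h1 _; simpa using h1
  | cons header rest ih =>
    intro ns st h1 h2
    simp only [List.foldl_cons, List.map_cons]
    have hstep : pvStepA st header =
        (pvOut (ns ++ [pvNorm header]),
         st.2.insert (pvNorm header) ((ns.count (pvNorm header) : Int))) := by
      unfold pvStepA
      rw [pvNormA_eq]
      generalize hh : pvNorm header = h
      simp only [h2 h]
      by_cases hz : ns.count h = 0
      · rw [if_pos hz, h1, pvOut_append]
        simp [pvLabel, hz]
      · rw [if_neg hz, h1, pvOut_append]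
        have hcz : (ns.count h : Int) ≠ 0 := by exact_mod_cast hz
        simp only [pvLabel, if_neg hcz, sub_add_cancel]
    rw [hstep]
    have := ih (ns ++ [pvNorm header])
      (pvOut (ns ++ [pvNorm header]), st.2.insert (pvNorm header) ((ns.count (pvNorm header) : Int)))
      rfl ?_
    · rw [this]; simp
    · intro name
      by_cases he : name = pvNorm header
      · subst he
        rw [PySem.Dict.get?_insert_self]
        simp [List.count_append]
      · rw [PySem.Dict.get?_insert_of_ne _ _ he, h2 name]
        have : (ns ++ [pvNorm header]).count name = ns.count name := by
          simp [List.count_append, Ne.symm he]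
        rw [this]

theorem pvA_eq_pvOut (headers : List (Option String)) :
    clean_duplicate_headers headers = pvOut (headers.map pvNorm) := by
  unfold clean_duplicate_headers
  have := pvFoldA_inv headers [] ([], PySem.Dict.empty) rfl
    (by intro name; simp [PySem.Dict.get?_empty])
  simpa using this

-- ---- B-side ----

-- the index list of a name: positions of the headers normalizing to it, in order
def pvIdx (ns : List String) (name : String) : List Int :=
  ((PySem.List.enumerate ns).filter (fun p => p.2 == name)).map (·.1)

theorem pvIdx_append (ns : List String) (h : String) (name : String) :
    pvIdx (ns ++ [h]) name =
      pvIdx ns name ++ (if h = name then [((ns.length : Nat) : Int)] else []) := by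
  unfold pvIdx
  rw [PySem.List.enumerate_append, List.filter_append, List.map_append]
  congr 1
  by_cases hh : h = name <;>
    simp [PySem.List.enumerate, hh]

theorem pvIdx_length (ns : List String) (name : String) :
    (pvIdx ns name).length = ns.count name := by
  induction ns using List.reverseRecOn with
  | nil => simp [pvIdx, PySem.List.enumerate]
  | append_singleton ns h ih =>
    rw [pvIdx_append]
    by_cases hh : h = name <;>
      simp [hh, List.count_append, ih]

-- every (rank, index) pair in a group describes a real position with that name and rank = prefix count
theorem pvIdx_enum_mem (ns : List String) (name : String) (p : Int × Int)
    (hp : p ∈ PySem.List.enumerate (pvIdx ns name)) :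
    ∃ (j : Nat) (hj : j < ns.length), p.2 = (j : Int) ∧ ns[j] = name ∧
      p.1 = (((ns.take j).count name : Nat) : Int) := by
  induction ns using List.reverseRecOn with
  | nil => simp [pvIdx, PySem.List.enumerate] at hp
  | append_singleton ns h ih =>
    rw [pvIdx_append] at hp
    by_cases hh : h = name
    · rw [if_pos hh, PySem.List.enumerate_append] at hp
      rcases List.mem_append.1 hp with hp1 | hp2
      · rcases ih hp1 with ⟨j, hj, h2, h3, h4⟩
        exact ⟨j, by simp; omega, h2, by
          rw [List.getElem_append_left hj]; exact h3, by
          rwa [List.take_append_of_le_length (le_of_lt hj)]⟩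
      · simp only [PySem.List.enumerate, zero_add, List.mem_singleton] at hp2
        subst hp2
        refine ⟨ns.length, by simp, by simp, by simp [hh], ?_⟩
        simp [pvIdx_length, hh]
    · rw [if_neg hh] at hp
      simp only [List.append_nil] at hp
      rcases ih hp with ⟨j, hj, h2, h3, h4⟩
      exact ⟨j, by simp; omega, h2, by
        rw [List.getElem_append_left hj]; exact h3, by
        rwa [List.take_append_of_le_length (le_of_lt hj)]⟩

-- conversely every position occurs in its name's group with rank = prefix count
theorem pvIdx_enum_mem_of_pos (ns : List String) (j : Nat) (hj : j < ns.length) :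
    ((((ns.take j).count ns[j] : Nat) : Int), (j : Int)) ∈
      PySem.List.enumerate (pvIdx ns ns[j]) := by
  induction ns using List.reverseRecOn with
  | nil => simp at hj
  | append_singleton ns h ih =>
    by_cases hjn : j < ns.length
    · have hget : (ns ++ [h])[j] = ns[j] := List.getElem_append_left hjn
      rw [hget, pvIdx_append, List.take_append_of_le_length (le_of_lt hjn)]
      by_cases hh : h = ns[j]
      · rw [if_pos hh, PySem.List.enumerate_append, List.mem_append]
        exact Or.inl (ih hjn)
      · rw [if_neg hh, List.append_nil]
        exact ih hjn
    · have hjl : j = ns.length := by simp at hj; omega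
      subst hjl
      have hget : (ns ++ [h])[ns.length] = h := by simp
      rw [hget, pvIdx_append, if_pos rfl, PySem.List.enumerate_append, List.mem_append]
      right
      simp [PySem.List.enumerate, pvIdx_length]

-- ---- generic scatter lemmas ----

theorem pvScatter_length (L : List (Nat × String)) (res : List String) :
    (L.foldl (fun r p => r.set p.1 p.2) res).length = res.length := by
  induction L generalizing res with
  | nil => rfl
  | cons a L ih => simp [List.foldl_cons, ih]

theorem pvScatter_getElem?_not_mem (L : List (Nat × String)) (res : List String) (j : Nat)
    (h : ∀ p ∈ L, p.1 ≠ j) :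
    (L.foldl (fun r p => r.set p.1 p.2) res)[j]? = res[j]? := by
  induction L generalizing res with
  | nil => rfl
  | cons a L ih =>
    simp only [List.foldl_cons]
    rw [ih _ (fun p hp => h p (List.mem_cons_of_mem _ hp)),
      List.getElem?_set_ne (h a (List.mem_cons_self) )]

theorem pvScatter_getElem? (L : List (Nat × String)) (res : List String) (j : Nat) (v : String)
    (hj : j < res.length) (hmem : (j, v) ∈ L) (huniq : ∀ p ∈ L, p.1 = j → p.2 = v) :
    (L.foldl (fun r p => r.set p.1 p.2) res)[j]? = some v := by
  induction L generalizing res with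
  | nil => simp at hmem
  | cons a L ih =>
    simp only [List.foldl_cons]
    by_cases htl : (j, v) ∈ L
    · exact ih _ (by rwa [List.length_set])
        htl (fun p hp h => huniq p (List.mem_cons_of_mem _ hp) h)
    · have ha : a = (j, v) := by
        rcases List.mem_cons.1 hmem with h | h
        · exact h.symm
        · exact absurd h htl
      subst ha
      have hnot : ∀ p ∈ L, p.1 ≠ j := by
        intro p hp hpj
        have := huniq p (List.mem_cons_of_mem _ hp) hpj
        exact htl (by cases p; simp_all)
      rw [pvScatter_getElem?_not_mem _ _ _ hnot]
      simp [hj]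

-- ---- B's fold equals pvOut ----

theorem pvB_eq_pvOut (headers : List (Option String)) :
    clean_duplicate_headers_alt headers = pvOut (headers.map pvNorm) := by
  unfold clean_duplicate_headers_alt
  generalize headers.map pvNorm = ns
  simp only []
  -- 1. re-key the grouping fold over (name, index) pairs
  rw [show (PySem.List.enumerate ns).foldl
        (fun d p => d.modify p.2 [] (· ++ [p.1])) (PySem.Dict.empty : PySem.Dict String (List Int))
      = ((PySem.List.enumerate ns).map (fun p => (p.2, p.1))).foldl
        (fun d q => d.modify q.1 [] (· ++ [q.2])) PySem.Dict.empty by rw [List.foldl_map]]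
  generalize hpairs : (PySem.List.enumerate ns).map (fun p => (p.2, p.1)) = pairs
  -- 2. the groups dict: keys = distinct names, group of a name = its index list
  have hnodup : ((pairs.foldl (fun d q => d.modify q.1 [] (· ++ [q.2]))
      (PySem.Dict.empty : PySem.Dict String (List Int)))).keys.Nodup :=
    PySem.Dict.nodup_keys_foldl_modify_key pairs (·.1) [] (fun _ q => (· ++ [q.2])) _
      PySem.Dict.nodup_keys_empty
  have hitems : ((pairs.foldl (fun d q => d.modify q.1 [] (· ++ [q.2]))
      (PySem.Dict.empty : PySem.Dict String (List Int)))).items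
      = (PySem.Set.ofList ns).map (fun k => (k, pvIdx ns k)) := by
    rw [PySem.Dict.items_eq_map_keys _ hnodup []]
    have hkeys : ((pairs.foldl (fun d q => d.modify q.1 [] (· ++ [q.2]))
        (PySem.Dict.empty : PySem.Dict String (List Int)))).keys = PySem.Set.ofList ns := by
      rw [PySem.Dict.keys_foldl_modify_key, ← hpairs, List.map_map]
      have : ((fun q : String × Int => q.1) ∘ fun p : Int × String => (p.2, p.1))
          = (fun p : Int × String => p.2) := rfl
      rw [this, PySem.List.map_snd_enumerate, PySem.Dict.keys_empty,
        PySem.Set.update_nil_left]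
    rw [hkeys]
    apply List.map_congr_left
    intro k _
    rw [PySem.Dict.getD_foldl_modify_append, PySem.Dict.getD_empty, List.nil_append,
      ← hpairs, List.filter_map, List.map_map]
    rfl
  rw [hitems]
  -- 3. flatten the two scatter loops into one assignment list
  rw [List.foldl_map]
  have hinner : (fun (res : List String) (name : String) =>
      (PySem.List.enumerate (pvIdx ns name)).foldl
        (fun res r => res.set r.2.toNat (pvLabel name r.1)) res)
      = fun res name =>
        (((PySem.List.enumerate (pvIdx ns name)).map
            (fun r => (r.2.toNat, pvLabel name r.1))).foldl
          (fun res p => res.set p.1 p.2) res) := by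
    funext res name
    rw [List.foldl_map]
  rw [hinner, ← List.foldl_flatMap]
  -- 4. pointwise comparison with pvOut
  apply List.ext_getElem?
  intro j
  have hlen : (List.foldl (fun (res : List String) (p : Nat × String) => res.set p.1 p.2)
      (List.replicate ns.length "")
      ((PySem.Set.ofList ns).flatMap (fun name =>
        (PySem.List.enumerate (pvIdx ns name)).map
          (fun r => (r.2.toNat, pvLabel name r.1))))).length = ns.length := by
    rw [pvScatter_length, List.length_replicate]
  by_cases hj : j < ns.length
  · rw [pvOut_getElem? ns j hj]
    apply pvScatter_getElem?
    · rwa [List.length_replicate]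
    · apply List.mem_flatMap.2
      refine ⟨ns[j], (PySem.Set.mem_ofList _ _).2 (List.getElem_mem hj), ?_⟩
      apply List.mem_map.2
      exact ⟨((((ns.take j).count ns[j] : Nat) : Int), (j : Int)),
        pvIdx_enum_mem_of_pos ns j hj, by simp⟩
    · intro p hp hpj
      rcases List.mem_flatMap.1 hp with ⟨name, _, hpm⟩
      rcases List.mem_map.1 hpm with ⟨r, hr, rfl⟩
      rcases pvIdx_enum_mem ns name r hr with ⟨j', hj', h2, h3, h4⟩
      simp only [h2, Int.toNat_natCast] at hpj
      subst hpj
      simp only [h4, h3]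
  · rw [List.getElem?_eq_none, List.getElem?_eq_none]
    · rw [pvOut_length]; omega
    · rw [hlen]; omega

-- ===== VERDICT (by name: the statement is the Claim_ definition above) =====
theorem clean_duplicate_headers_spec : Claim_equal_clean_duplicate_headers := by
  intro headers _
  unfold Spec_clean_duplicate_headers
  rw [pvA_eq_pvOut, pvB_eq_pvOut]
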